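-- pv_equiv track=rewrite | github.com/dMedinaO/hydrophobinsIdentification | scripts/searchCandidateSequence.py | searchDifferenceCys
-- ===== SOURCE A (Python) =====
-- def searchDifferenceCys(sequence):
--
--     indexCys = []
--
--     for i in range(len(sequence)):
--         if sequence[i] == 'C':
--             indexCys.append(i)
--
--     responseType = []
--     for i in range(len(indexCys)-1):
--         diff = indexCys[i+1] - indexCys[i]
--         try:
--             if diff>=5 and diff <=7:
--                 responseType.append(1)
--             elif diff>=9 and diff<=10:
--                 responseType.append(2)
--             else:
--                 responseType.append(0)
--         except:
--             responseType.append(0)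
--             pass
--     #con respecto a los posibles tipos evaluo cual es la opcion: 0-> nada, 1-> class I, 2-> class II, 3-> ambas
--     contData = 0
--     exist1 = 0
--     exist2 = 0
--
--     for element in responseType:
--         if element == 0:
--             contData+=1
--         elif element == 1:
--             exist1 = 1
--         else:
--             exist2 = 1
--
--     if len(responseType) == contData:#de ninguna
--         return 0
--     elif exist1 == 1 and exist2 == 1:#de ambas
--         return 3
--     elif exist1 == 1 and exist2 == 0:#solo de clase I
--         return 1
--     else:#solo de clase II
--         return 2
-- ===== SOURCE B (Python) =====
-- def searchDifferenceCys(sequence):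
--     # Single streaming pass: a running distance counter since the previous 'C'
--     # replaces A's position list, gap list, response list and counting loop.
--     classI = False
--     classII = False
--     dist = None  # chars since the previous 'C'; None before the first 'C'
--     for ch in sequence:
--         if dist is not None:
--             dist += 1
--         if ch == 'C':
--             if dist is not None:
--                 if 5 <= dist <= 7:
--                     classI = True
--                 elif 9 <= dist <= 10:
--                     classII = True
--             dist = 0
--     return (1 if classI else 0) + (2 if classII else 0)
-- ===== Notes on version B (the rewrite author's own statement) =====
-- stated objective: alternative
-- what changed: B is a single streaming pass over the characters keeping only (classI, classII, distance-since-last-C); it never materialises A's position list, gap/response lists or the counting loop, and returns the closed form classI + 2*classII.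
import Mathlib
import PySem

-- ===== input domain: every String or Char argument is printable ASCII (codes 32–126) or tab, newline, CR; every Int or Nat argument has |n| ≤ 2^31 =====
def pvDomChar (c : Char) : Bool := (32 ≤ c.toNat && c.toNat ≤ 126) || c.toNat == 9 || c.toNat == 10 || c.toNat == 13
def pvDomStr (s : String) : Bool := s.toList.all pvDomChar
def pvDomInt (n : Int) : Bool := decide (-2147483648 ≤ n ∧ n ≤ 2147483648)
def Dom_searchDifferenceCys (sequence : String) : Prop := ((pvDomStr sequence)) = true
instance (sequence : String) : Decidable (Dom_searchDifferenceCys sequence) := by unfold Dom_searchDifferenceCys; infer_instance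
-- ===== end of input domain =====

-- B replaces A's staged passes (position list, gap/response lists, counting loop, if/elif chain)
-- by ONE streaming pass over the characters keeping only two class flags and the running
-- distance since the previous 'C'; same O(n) cost, alternative decomposition.

-- ===== PORT A =====
def searchDifferenceCys (sequence : String) : Int :=
  let cs := sequence.toList
  -- for i in range(len(sequence)): if sequence[i] == 'C': indexCys.append(i)
  let indexCys : List Int := (List.range cs.length).foldl
    (fun acc i => if cs.getD i ' ' == 'C' then acc ++ [(i : Int)] else acc) []
  -- for i in range(len(indexCys)-1): diff = indexCys[i+1]-indexCys[i]; append 1 / 2 / 0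
  let responseType : List Int := (List.range (indexCys.length - 1)).foldl
    (fun acc i =>
      let diff := indexCys.getD (i + 1) 0 - indexCys.getD i 0
      if 5 ≤ diff ∧ diff ≤ 7 then acc ++ [1]
      else if 9 ≤ diff ∧ diff ≤ 10 then acc ++ [2]
      else acc ++ [0]) []
  -- contData / exist1 / exist2 loop
  let st := responseType.foldl
    (fun (st : Int × Int × Int) e =>
      if e = 0 then (st.1 + 1, st.2.1, st.2.2)
      else if e = 1 then (st.1, 1, st.2.2)
      else (st.1, st.2.1, 1)) (0, 0, 0)
  if (responseType.length : Int) = st.1 then 0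
  else if st.2.1 = 1 ∧ st.2.2 = 1 then 3
  else if st.2.1 = 1 ∧ st.2.2 = 0 then 1
  else 2

-- ===== PORT B =====
-- state = (classI, classII, dist); dist : Option Int = chars since the previous 'C'
def searchDifferenceCys_alt (sequence : String) : Int :=
  let st := sequence.toList.foldl
    (fun (st : Bool × Bool × Option Int) ch =>
      let d := st.2.2.map (· + 1)            -- if dist is not None: dist += 1
      if ch == 'C' then
        match d with
        | none => (st.1, st.2.1, some 0)
        | some k =>
          if 5 ≤ k ∧ k ≤ 7 then (true, st.2.1, some 0)
          else if 9 ≤ k ∧ k ≤ 10 then (st.1, true, some 0)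
          else (st.1, st.2.1, some 0)
      else (st.1, st.2.1, d))
    (false, false, none)
  (if st.1 then 1 else 0) + (if st.2.1 then 2 else 0)

-- ===== PRECONDITION & SPEC =====
def Spec_searchDifferenceCys (sequence : String) (out : Int) : Prop := out = searchDifferenceCys_alt sequence
instance (sequence : String) (out : Int) : Decidable (Spec_searchDifferenceCys sequence out) := by unfold Spec_searchDifferenceCys; infer_instance

-- ===== CLAIM (what is proved, stated in full; the proofs are below) =====
def Claim_equal_searchDifferenceCys : Prop := ∀ (sequence : String), Dom_searchDifferenceCys sequence → Spec_searchDifferenceCys sequence (searchDifferenceCys sequence)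

-- ===== LEMMAS AND PROOFS =====

-- ---- A-side characterisation ----

theorem pv_adj_map {β : Type} (g : Int → Int → β) (d : Int) :
    ∀ l : List Int, (List.range (l.length - 1)).map (fun i => g (l.getD (i + 1) d) (l.getD i d))
      = (l.zip l.tail).map (fun p => g p.2 p.1) := by
  intro l
  induction l with
  | nil => simp
  | cons x xs ih =>
    cases xs with
    | nil => simp
    | cons y ys =>
      simp only [List.length_cons, Nat.add_sub_cancel] at ih ⊢
      rw [List.range_succ_eq_map, List.map_cons, List.map_map, List.tail_cons, List.zip_cons_cons,
        List.map_cons]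
      congr 1

theorem pv_fold3 (L : List Int) : ∀ (c e1 e2 : Int),
    L.foldl (fun (st : Int × Int × Int) e =>
      if e = 0 then (st.1 + 1, st.2.1, st.2.2)
      else if e = 1 then (st.1, 1, st.2.2)
      else (st.1, st.2.1, 1)) (c, e1, e2)
    = (c + (L.count 0 : Int),
       if (1 : Int) ∈ L then 1 else e1,
       if ∃ x ∈ L, ¬ x = 0 ∧ ¬ x = 1 then 1 else e2) := by
  induction L with
  | nil => intro c e1 e2; simp
  | cons a L ih =>
    intro c e1 e2
    rw [List.foldl_cons]
    by_cases h0 : a = 0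
    · rw [if_pos h0, ih]
      subst h0
      simp only [List.count_cons, List.mem_cons, Prod.mk.injEq]
      refine ⟨by simp; ring, by simp, by simp⟩
    · rw [if_neg h0]
      by_cases h1 : a = 1
      · rw [if_pos h1, ih]
        subst h1
        simp only [List.count_cons, List.mem_cons, Prod.mk.injEq]
        refine ⟨by simp, by simp, by simp [h0]⟩
      · rw [if_neg h1, ih]
        simp only [List.count_cons, List.mem_cons, Prod.mk.injEq]
        refine ⟨by simp [h0], by simp [Ne.symm h1], by simp [h0, h1]⟩

def pvClassify (d : Int) : Int :=
  if 5 ≤ d ∧ d ≤ 7 then 1 else if 9 ≤ d ∧ d ≤ 10 then 2 else 0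

theorem pvClassify_eq_one (d : Int) : pvClassify d = 1 ↔ (5 ≤ d ∧ d ≤ 7) := by
  unfold pvClassify; split_ifs <;> simp_all

theorem pvClassify_ne01 (d : Int) : (¬ pvClassify d = 0 ∧ ¬ pvClassify d = 1) ↔ (9 ≤ d ∧ d ≤ 10) := by
  unfold pvClassify; split_ifs <;> simp_all; omega

theorem pvClassify_eq_zero (d : Int) : pvClassify d = 0 ↔ (¬ (5 ≤ d ∧ d ≤ 7) ∧ ¬ (9 ≤ d ∧ d ≤ 10)) := by
  unfold pvClassify; split_ifs <;> simp_all

theorem pv_final (G : List Int) :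
    (if ((G.map pvClassify).length : Int)
        = ((G.map pvClassify).foldl (fun (st : Int × Int × Int) e =>
            if e = 0 then (st.1 + 1, st.2.1, st.2.2)
            else if e = 1 then (st.1, 1, st.2.2)
            else (st.1, st.2.1, 1)) (0, 0, 0)).1 then (0:Int)
     else if ((G.map pvClassify).foldl (fun (st : Int × Int × Int) e =>
            if e = 0 then (st.1 + 1, st.2.1, st.2.2)
            else if e = 1 then (st.1, 1, st.2.2)
            else (st.1, st.2.1, 1)) (0, 0, 0)).2.1 = 1
          ∧ ((G.map pvClassify).foldl (fun (st : Int × Int × Int) e =>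
            if e = 0 then (st.1 + 1, st.2.1, st.2.2)
            else if e = 1 then (st.1, 1, st.2.2)
            else (st.1, st.2.1, 1)) (0, 0, 0)).2.2 = 1 then (3:Int)
     else if ((G.map pvClassify).foldl (fun (st : Int × Int × Int) e =>
            if e = 0 then (st.1 + 1, st.2.1, st.2.2)
            else if e = 1 then (st.1, 1, st.2.2)
            else (st.1, st.2.1, 1)) (0, 0, 0)).2.1 = 1
          ∧ ((G.map pvClassify).foldl (fun (st : Int × Int × Int) e =>
            if e = 0 then (st.1 + 1, st.2.1, st.2.2)
            else if e = 1 then (st.1, 1, st.2.2)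
            else (st.1, st.2.1, 1)) (0, 0, 0)).2.2 = 0 then 1
     else 2)
    = (if G.any (fun d => decide (5 ≤ d) && decide (d ≤ 7)) then 1 else 0)
      + (if G.any (fun d => decide (9 ≤ d) && decide (d ≤ 10)) then 2 else 0) := by
  rw [pv_fold3]
  have hm1 : ((1 : Int) ∈ G.map pvClassify) ↔ ∃ d ∈ G, 5 ≤ d ∧ d ≤ 7 := by
    simp [List.mem_map, pvClassify_eq_one]
  have hm2 : (∃ x ∈ G.map pvClassify, ¬ x = 0 ∧ ¬ x = 1) ↔ ∃ d ∈ G, 9 ≤ d ∧ d ≤ 10 := by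
    simp only [List.mem_map]
    constructor
    · rintro ⟨x, ⟨d, hd, rfl⟩, h⟩; exact ⟨d, hd, (pvClassify_ne01 d).mp h⟩
    · rintro ⟨d, hd, h⟩; exact ⟨pvClassify d, ⟨d, hd, rfl⟩, (pvClassify_ne01 d).mpr h⟩
  have hany1 : (G.any (fun d => decide (5 ≤ d) && decide (d ≤ 7)) = true) ↔ ∃ d ∈ G, 5 ≤ d ∧ d ≤ 7 := by
    simp
  have hany2 : (G.any (fun d => decide (9 ≤ d) && decide (d ≤ 10)) = true) ↔ ∃ d ∈ G, 9 ≤ d ∧ d ≤ 10 := by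
    simp
  have hlen : ((((G.map pvClassify).length : Int) = 0 + ((G.map pvClassify).count 0 : Int))
      ↔ ((¬ ∃ d ∈ G, 5 ≤ d ∧ d ≤ 7) ∧ ¬ ∃ d ∈ G, 9 ≤ d ∧ d ≤ 10)) := by
    rw [zero_add]
    constructor
    · intro h
      have hcnt : (G.map pvClassify).count 0 = (G.map pvClassify).length := by exact_mod_cast h.symm
      have hall := List.count_eq_length.mp hcnt
      constructor
      · rintro ⟨d, hd, hc⟩
        have := hall (pvClassify d) (List.mem_map_of_mem hd)
        rw [(pvClassify_eq_one d).mpr hc] at this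
        simp at this
      · rintro ⟨d, hd, hc⟩
        have := hall (pvClassify d) (List.mem_map_of_mem hd)
        have h2 := (pvClassify_ne01 d).mpr hc
        simp at this
        exact h2.1 this.symm
    · rintro ⟨h1, h2⟩
      have : (G.map pvClassify).count 0 = (G.map pvClassify).length := by
        apply List.count_eq_length.mpr
        rintro x hx
        rw [List.mem_map] at hx
        obtain ⟨d, hd, rfl⟩ := hx
        have := (pvClassify_eq_zero d).mpr ⟨fun hc => h1 ⟨d, hd, hc⟩, fun hc => h2 ⟨d, hd, hc⟩⟩
        simp [this]
      exact_mod_cast this.symm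
  by_cases hA : ∃ d ∈ G, 5 ≤ d ∧ d ≤ 7 <;> by_cases hB : ∃ d ∈ G, 9 ≤ d ∧ d ≤ 10
  · rw [if_pos (hm1.mpr hA), if_pos (hm2.mpr hB), if_neg (fun h => (hlen.mp h).1 hA)]
    simp [hany1, hany2, hA, hB]
  · rw [if_pos (hm1.mpr hA), if_neg (fun h => hB (hm2.mp h)), if_neg (fun h => (hlen.mp h).1 hA)]
    simp [hany1, hany2, hA, hB]
  · rw [if_neg (fun h => hA (hm1.mp h)), if_pos (hm2.mpr hB), if_neg (fun h => (hlen.mp h).2 hB)]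
    simp [hany1, hany2, hA, hB]
  · rw [if_neg (fun h => hA (hm1.mp h)), if_neg (fun h => hB (hm2.mp h)), if_pos (hlen.mpr ⟨hA, hB⟩)]
    simp [hany1, hany2, hA, hB]

-- A's gap loop equals the classification map over the adjacent-difference list.
theorem pv_responseType (P : List Int) :
    (List.range (P.length - 1)).foldl
      (fun acc i =>
        let diff := P.getD (i + 1) 0 - P.getD i 0
        if 5 ≤ diff ∧ diff ≤ 7 then acc ++ [(1 : Int)]
        else if 9 ≤ diff ∧ diff ≤ 10 then acc ++ [2]
        else acc ++ [0]) []
    = ((P.zip P.tail).map (fun p => p.2 - p.1)).map pvClassify := by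
  have hbody : (fun (acc : List Int) (i : Nat) =>
      let diff := P.getD (i + 1) 0 - P.getD i 0
      if 5 ≤ diff ∧ diff ≤ 7 then acc ++ [(1 : Int)]
      else if 9 ≤ diff ∧ diff ≤ 10 then acc ++ [2]
      else acc ++ [0])
      = fun acc i => acc ++ [pvClassify (P.getD (i + 1) 0 - P.getD i 0)] := by
    funext acc i
    simp only [pvClassify]
    split_ifs <;> rfl
  rw [hbody, PySem.List.foldl_append_singleton_eq_map, List.nil_append,
    pv_adj_map (fun b a => pvClassify (b - a)) 0 P, List.map_map]
  rfl

-- ---- B-side characterisation ----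

-- positions of 'C' in cs, numbered from s
def pvPosl (s : Int) : List Char → List Int
  | [] => []
  | c :: t => if c == 'C' then s :: pvPosl (s + 1) t else pvPosl (s + 1) t

def pvGapsOf (l : List Int) : List Int := (l.zip l.tail).map (fun p => p.2 - p.1)

-- the gaps B's counter will close, given the incoming dist state d
def pvGapsFrom (d : Option Int) : List Char → List Int
  | [] => []
  | c :: t =>
    if c == 'C' then
      match d with
      | none => pvGapsFrom (some 0) t
      | some k => (k + 1) :: pvGapsFrom (some 0) t
    else pvGapsFrom (d.map (· + 1)) t

theorem pvGapsOf_cons2 (x y : Int) (l : List Int) :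
    pvGapsOf (x :: y :: l) = (y - x) :: pvGapsOf (y :: l) := by
  simp [pvGapsOf]

theorem pvGapsOf_single (x : Int) : pvGapsOf [x] = [] := by simp [pvGapsOf]

-- B's running counter closes exactly the adjacent gaps of the 'C'-position list.
theorem pv_gapsFrom : ∀ (cs : List Char) (s : Int),
    pvGapsFrom none cs = pvGapsOf (pvPosl s cs) ∧
    ∀ k : Int, pvGapsFrom (some k) cs = pvGapsOf ((s - 1 - k) :: pvPosl s cs) := by
  intro cs
  induction cs with
  | nil => intro s; exact ⟨rfl, fun k => (pvGapsOf_single _).symm⟩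
  | cons c t ih =>
    intro s
    by_cases hc : (c == 'C') = true
    · have ih2 := (ih (s + 1)).2
      have hhead : pvPosl s (c :: t) = s :: pvPosl (s + 1) t := by simp [pvPosl, hc]
      have h0 : s + 1 - 1 - (0 : Int) = s := by ring
      constructor
      · show pvGapsFrom none (c :: t) = _
        simp only [pvGapsFrom, hc, if_pos, hhead]
        rw [ih2 0, h0]
      · intro k
        show pvGapsFrom (some k) (c :: t) = _
        simp only [pvGapsFrom, hc, if_pos, hhead]
        rw [ih2 0, h0, pvGapsOf_cons2]
        congr 1
        ring
    · have hhead : pvPosl s (c :: t) = pvPosl (s + 1) t := by simp [pvPosl, hc]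
      constructor
      · show pvGapsFrom none (c :: t) = _
        simp only [pvGapsFrom, hc, Bool.false_eq_true, if_false, Option.map_none, hhead]
        exact (ih (s + 1)).1
      · intro k
        show pvGapsFrom (some k) (c :: t) = _
        simp only [pvGapsFrom, hc, Bool.false_eq_true, if_false, Option.map_some, hhead]
        rw [(ih (s + 1)).2 (k + 1)]
        congr 2
        ring

-- pvPosl equals A's range-filter index list form.
theorem pv_posl_eq : ∀ (cs : List Char) (s : Int),
    pvPosl s cs
      = ((List.range cs.length).filter (fun i => cs.getD i ' ' == 'C')).map (fun i : Nat => s + (i : Int)) := by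
  intro cs
  induction cs with
  | nil => intro s; simp [pvPosl]
  | cons c t ih =>
    intro s
    simp only [List.length_cons, List.range_succ_eq_map, List.filter_cons, List.getD_cons_zero,
      List.filter_map, List.filter_cons]
    have hsucc : ∀ r : List Nat,
        List.map (fun i : Nat => s + (i : Int)) (List.map Nat.succ r)
          = List.map (fun i : Nat => (s + 1) + (i : Int)) r := by
      intro r
      rw [List.map_map]
      apply List.map_congr_left
      intro i _; simp [Function.comp]; ring
    by_cases hc : (c == 'C') = true
    · simp only [pvPosl, hc, if_pos, List.map_cons, ih (s + 1)]
      congr 1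
      · simp
      · rw [hsucc]
        congr 1
    · simp only [pvPosl, hc, Bool.false_eq_true, if_false, ih (s + 1)]
      rw [hsucc]
      congr 1

-- B's single pass computes the two `any` flags over pvGapsFrom.
theorem pv_foldB : ∀ (cs : List Char) (b1 b2 : Bool) (d : Option Int), ∃ d' : Option Int,
    cs.foldl
      (fun (st : Bool × Bool × Option Int) ch =>
        let d := st.2.2.map (· + 1)
        if ch == 'C' then
          match d with
          | none => (st.1, st.2.1, some 0)
          | some k =>
            if 5 ≤ k ∧ k ≤ 7 then (true, st.2.1, some 0)
            else if 9 ≤ k ∧ k ≤ 10 then (st.1, true, some 0)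
            else (st.1, st.2.1, some 0)
        else (st.1, st.2.1, d))
      (b1, b2, d)
    = (b1 || (pvGapsFrom d cs).any (fun g => decide (5 ≤ g) && decide (g ≤ 7)),
       b2 || (pvGapsFrom d cs).any (fun g => decide (9 ≤ g) && decide (g ≤ 10)),
       d') := by
  intro cs
  induction cs with
  | nil => intro b1 b2 d; exact ⟨d, by simp [pvGapsFrom]⟩
  | cons c t ih =>
    intro b1 b2 d
    rw [List.foldl_cons]
    by_cases hc : (c == 'C') = true
    · cases d with
      | none =>
        obtain ⟨d', hd'⟩ := ih b1 b2 (some 0)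
        refine ⟨d', ?_⟩
        simp only [hc, if_pos, Option.map_none]
        rw [hd']
        simp [pvGapsFrom, hc]
      | some k =>
        simp only [hc, if_pos, Option.map_some]
        have hg : pvGapsFrom (some k) (c :: t) = (k + 1) :: pvGapsFrom (some 0) t := by
          simp [pvGapsFrom, hc]
        by_cases h1 : 5 ≤ k + 1 ∧ k + 1 ≤ 7
        · obtain ⟨d', hd'⟩ := ih true b2 (some 0)
          refine ⟨d', ?_⟩
          rw [if_pos h1, hd', hg]
          have hI' : (decide (5 ≤ k + 1) && decide (k + 1 ≤ 7)) = true := by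
            simp only [Bool.and_eq_true, decide_eq_true_eq]; omega
          have hII' : (decide (9 ≤ k + 1) && decide (k + 1 ≤ 10)) = false := by
            simp only [Bool.and_eq_false_iff, decide_eq_false_iff_not]; omega
          simp only [List.any_cons, hI', hII', Bool.true_or, Bool.false_or, Bool.or_true]
        · by_cases h2 : 9 ≤ k + 1 ∧ k + 1 ≤ 10
          · obtain ⟨d', hd'⟩ := ih b1 true (some 0)
            refine ⟨d', ?_⟩
            rw [if_neg h1, if_pos h2, hd', hg]
            have hI' : (decide (5 ≤ k + 1) && decide (k + 1 ≤ 7)) = false := by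
              simp only [Bool.and_eq_false_iff, decide_eq_false_iff_not]; omega
            have hII' : (decide (9 ≤ k + 1) && decide (k + 1 ≤ 10)) = true := by
              simp only [Bool.and_eq_true, decide_eq_true_eq]; omega
            simp only [List.any_cons, hI', hII', Bool.true_or, Bool.false_or, Bool.or_true]
          · obtain ⟨d', hd'⟩ := ih b1 b2 (some 0)
            refine ⟨d', ?_⟩
            rw [if_neg h1, if_neg h2, hd', hg]
            have hI' : (decide (5 ≤ k + 1) && decide (k + 1 ≤ 7)) = false := by
              simp only [Bool.and_eq_false_iff, decide_eq_false_iff_not]; omega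
            have hII' : (decide (9 ≤ k + 1) && decide (k + 1 ≤ 10)) = false := by
              simp only [Bool.and_eq_false_iff, decide_eq_false_iff_not]; omega
            simp only [List.any_cons, hI', hII', Bool.true_or, Bool.false_or, Bool.or_true]
    · obtain ⟨d', hd'⟩ := ih b1 b2 (d.map (· + 1))
      refine ⟨d', ?_⟩
      simp only [hc, Bool.false_eq_true, if_false]
      rw [hd']
      simp [pvGapsFrom, hc]

-- ===== VERDICT (by name: the statement is the Claim_ definition above) =====
theorem searchDifferenceCys_spec : Claim_equal_searchDifferenceCys := by
  intro sequence _
  show searchDifferenceCys sequence = searchDifferenceCys_alt sequence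
  unfold searchDifferenceCys searchDifferenceCys_alt
  obtain ⟨d', hB⟩ := pv_foldB sequence.toList false false none
  rw [hB]
  rw [(pv_gapsFrom sequence.toList 0).1, pv_posl_eq sequence.toList 0]
  simp only [PySem.List.foldl_append_if, List.nil_append, pv_responseType, Bool.false_or,
    zero_add]
  rw [pv_final]
  congr 2
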